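-- pv_equiv track=rewrite | github.com/TharunThomas8/e-filing | app.py | format_number_indian
-- ===== SOURCE A (Python) =====
-- def format_number_indian(number: str) -> str:
--     """Convert an integer to a string with commas in Indian number format"""
--     if len(number) <= 3:
--         return number
--
--     last_three = number[-3:]
--     rest = number[:-3]
--
--     # Reverse, group by 2s, reverse again
--     rest = rest[::-1]
--     grouped = [rest[i:i+2] for i in range(0, len(rest), 2)]
--     formatted_rest = ','.join(grouped)[::-1]
--     return formatted_rest + ',' + last_three
-- ===== SOURCE B (Python) =====
-- def format_number_indian(number: str) -> str:
--     """Convert an integer to a string with commas in Indian number format"""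
--     if len(number) <= 3:
--         return number
--     n = len(number)
--     out = []
--     for i, ch in enumerate(number):
--         if i > 0 and (n - i) % 2 == 1 and (n - i) >= 3:
--             out.append(',')
--         out.append(ch)
--     return ''.join(out)
-- ===== Notes on version B (the rewrite author's own statement) =====
-- stated objective: alternative
-- what changed: Replaces A's reverse/slice/group-by-2/join/reverse strategy with a single forward pass that decides by index parity where to insert a comma.
import Mathlib
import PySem

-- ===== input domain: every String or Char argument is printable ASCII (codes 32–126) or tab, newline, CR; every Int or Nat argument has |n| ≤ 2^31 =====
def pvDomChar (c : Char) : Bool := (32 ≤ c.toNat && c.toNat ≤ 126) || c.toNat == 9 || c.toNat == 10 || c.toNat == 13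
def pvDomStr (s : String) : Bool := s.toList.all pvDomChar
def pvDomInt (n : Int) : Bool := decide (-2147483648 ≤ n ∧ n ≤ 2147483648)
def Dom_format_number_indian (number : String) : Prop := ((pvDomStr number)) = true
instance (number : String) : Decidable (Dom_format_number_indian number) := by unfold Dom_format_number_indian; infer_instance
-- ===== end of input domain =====

-- B replaces A's reverse / group-by-2 / join / reverse strategy with a single forward pass that
-- inserts each comma by index position (objective: alternative decomposition, same asymptotic cost).

-- ===== PORT A =====
def format_number_indian (number : String) : String :=
  let cs := number.toList
  if PySem.Chars.len cs ≤ 3 then number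
  else
    let last_three := PySem.Chars.slice cs (some (-3)) none            -- number[-3:]
    let rest := PySem.Chars.slice cs none (some (-3))                  -- number[:-3]
    let restR := rest.reverse                                          -- rest[::-1] (exact: Str.slice?_none_none_neg_one)
    let grouped := (PySem.List.pyRange 0 (PySem.Chars.len restR) 2).map
      (fun i => PySem.Chars.slice restR (some i) (some (i + 2)))       -- [rest[i:i+2] for i in range(0, len(rest), 2)]
    let formatted_rest := (PySem.Chars.join [','] grouped).reverse     -- ','.join(grouped)[::-1]
    String.ofList (formatted_rest ++ [','] ++ last_three)

-- ===== PORT B =====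
def format_number_indian_alt (number : String) : String :=
  let cs := number.toList
  if PySem.Chars.len cs ≤ 3 then number
  else
    let n := PySem.Chars.len cs
    let out := (PySem.List.enumerate cs 0).foldl
      (fun acc p =>
        (if p.1 > 0 ∧ PySem.Int.mod (n - p.1) 2 = 1 ∧ n - p.1 ≥ 3 then acc ++ [','] else acc)
          ++ [p.2]) []
    String.ofList out

-- ===== PRECONDITION & SPEC =====
def Spec_format_number_indian (number : String) (out : String) : Prop := out = format_number_indian_alt number
instance (number : String) (out : String) : Decidable (Spec_format_number_indian number out) := by unfold Spec_format_number_indian; infer_instance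

-- ===== CLAIM (what is proved, stated in full; the proofs are below) =====
def Claim_equal_format_number_indian : Prop := ∀ (number : String), Dom_format_number_indian number → Spec_format_number_indian number (format_number_indian number)

-- ===== LEMMAS AND PROOFS =====

def pvChunks (s : List Char) : List (List Char) :=
  (PySem.List.pyRange 0 (PySem.Chars.len s) 2).map
    (fun i => PySem.Chars.slice s (some i) (some (i + 2)))

lemma pvChunks_single (a : Char) : pvChunks [a] = [[a]] := by
  simp [pvChunks, PySem.Chars.len, PySem.List.pyRange_of_pos 0 1 (by omega : (0:Int) < 2),
        PySem.List.slice_to _ (by omega : (0:Int) ≤ 2)]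

lemma pyRange2_step (m : Nat) :
    PySem.List.pyRange 0 ((m : Int) + 2) 2 = 0 :: (PySem.List.pyRange 0 (m : Int) 2).map (· + 2) := by
  rw [PySem.List.pyRange_of_pos _ _ (by omega : (0:Int) < 2),
      PySem.List.pyRange_of_pos _ _ (by omega : (0:Int) < 2)]
  by_cases hm : 0 < m
  · rw [if_pos (by omega : (0:Int) < (m:Int)+2), if_pos (by exact_mod_cast hm : (0:Int) < (m:Int))]
    have h2 : (((m:Int) + 2 - 0 + 2 - 1)/2).toNat = (((m:Int) - 0 + 2 - 1)/2).toNat + 1 := by omega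
    rw [h2, List.range_succ_eq_map]
    simp [List.map_map, Function.comp]
    intro k hk; ring
  · have hm0 : m = 0 := by omega
    subst hm0
    norm_num

lemma slice2_nat (t : List Char) (k : Nat) :
    PySem.Chars.slice t (some (k:Int)) (some ((k:Int) + 2)) = (t.drop k).take 2 := by
  simp [PySem.Chars.slice_eq_listSlice]
  rw [show (k:Int) + 2 = (((k+2:Nat)):Int) by push_cast; ring, PySem.List.slice_natCast]
  congr 1
  omega

lemma pvChunks_cons₂ (a b : Char) (t : List Char) :
    pvChunks (a :: b :: t) = [a, b] :: pvChunks t := by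
  have hlen : PySem.Chars.len (a :: b :: t) = (t.length : Int) + 2 := by
    simp [PySem.Chars.len]; ring
  rw [pvChunks, hlen, pyRange2_step]
  simp only [List.map_cons, List.map_map, Function.comp_def]
  rw [List.cons_eq_cons]
  refine ⟨?_, ?_⟩
  · have := slice2_nat (a :: b :: t) 0
    simpa using this
  · rw [pvChunks]
    apply List.map_congr_left
    intro i hi
    obtain ⟨h0, hlt, _⟩ := (PySem.List.mem_pyRange_iff_of_pos (by omega : (0:Int) < 2) i).1 hi
    obtain ⟨k, rfl⟩ : ∃ k : Nat, i = (k : Int) := ⟨i.toNat, by omega⟩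
    rw [show (k:Int) + 2 = (((k+2:Nat)):Int) by push_cast; ring, slice2_nat,
        show (((k+2:Nat)):Int) = ((k:Nat):Int) + 2 by push_cast; ring, slice2_nat]
    simp

def pvG (n : Int) (p : Int × Char) : List Char :=
  (if p.1 > 0 ∧ PySem.Int.mod (n - p.1) 2 = 1 ∧ n - p.1 ≥ 3 then [','] else []) ++ [p.2]

lemma pvG_congr (n n' : Int) (p : Int × Char) (hpar : PySem.Int.mod (n - p.1) 2 = PySem.Int.mod (n' - p.1) 2)
    (hge : (n - p.1 ≥ 3) ↔ (n' - p.1 ≥ 3)) : pvG n p = pvG n' p := by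
  unfold pvG
  rw [hpar]
  by_cases h1 : p.1 > 0 <;> by_cases h2 : PySem.Int.mod (n' - p.1) 2 = 1 <;> simp [h1, hge]

lemma pvChunks_ne_nil (s : List Char) (h : s ≠ []) : pvChunks s ≠ [] := by
  match s with
  | [a] => rw [pvChunks_single]; simp
  | a :: b :: t => rw [pvChunks_cons₂]; simp

lemma mod_shift2 (x : Int) : PySem.Int.mod (x + 2) 2 = PySem.Int.mod x 2 := by
  simp [PySem.Int.mod]

lemma pvChunks_nil : pvChunks [] = [] := by
  rw [pvChunks]
  simp [PySem.Chars.len, PySem.List.pyRange_of_pos 0 0 (by omega : (0:Int) < 2)]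

theorem pvMain : ∀ (s : List Char),
    (PySem.Chars.join [','] (pvChunks s)).reverse
      = (PySem.List.enumerate s.reverse 0).flatMap (pvG ((s.length : Int) + 3))
  | [] => by simp [pvChunks_nil]
  | [a] => by
      rw [pvChunks_single, PySem.Chars.join_singleton]
      simp [PySem.List.enumerate_cons, PySem.List.enumerate_nil, pvG]
  | a :: b :: t => by
      have ih := pvMain t
      rw [pvChunks_cons₂]
      have hrev : (a :: b :: t).reverse = t.reverse ++ [b, a] := by simp
      rw [hrev, PySem.List.enumerate_append]
      rw [List.flatMap_append]
      have hlen : (t.reverse.length : Int) = (t.length : Int) := by simp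
      -- right part: contributions of b (index |t|) and a (index |t|+1)
      have hb : PySem.List.enumerate [b, a] (0 + (t.reverse.length : Int))
          = [((t.length : Int), b), ((t.length : Int) + 1, a)] := by
        simp [PySem.List.enumerate_cons, PySem.List.enumerate_nil]
      rw [hb]
      have hn : ((a :: b :: t).length : Int) + 3 = (t.length : Int) + 5 := by
        simp; ring
      rw [hn]
      -- flatMap over the two-element list
      have hright : [((t.length : Int), b), ((t.length : Int) + 1, a)].flatMap (pvG ((t.length : Int) + 5))
          = (if t = [] then [b, a] else [',', b, a]) := by
        by_cases ht : t = []
        · subst ht; simp [pvG]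
        · have htl : 0 < t.length := List.length_pos_iff.2 ht
          have h0 : (0:Int) < (t.length : Int) := by exact_mod_cast htl
          simp only [List.flatMap_cons, List.flatMap_nil, pvG]
          rw [if_pos, if_neg]
          · simp [ht]
          · -- index |t|+1 : n - i = 4, even
            intro ⟨_, hmod, _⟩
            have : (t.length : Int) + 5 - ((t.length : Int) + 1) = 4 := by ring
            rw [this] at hmod
            simp [PySem.Int.mod] at hmod
          · refine ⟨h0, ?_, ?_⟩
            · have : (t.length : Int) + 5 - (t.length : Int) = 5 := by ring
              rw [this]; simp [PySem.Int.mod]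
            · omega
      rw [hright]
      -- left part: flatMap with n = |t|+5 equals flatMap with n = |t|+3 on indices < |t|
      have hleft : (PySem.List.enumerate t.reverse 0).flatMap (pvG ((t.length : Int) + 5))
          = (PySem.List.enumerate t.reverse 0).flatMap (pvG ((t.length : Int) + 3)) := by
        apply List.flatMap_congr
        intro p hp
        obtain ⟨k, hk, rfl⟩ := (PySem.List.mem_enumerate_iff _ _ _).1 hp
        apply pvG_congr
        · have : (t.length : Int) + 5 - (0 + (k:Int)) = ((t.length : Int) + 3 - (0 + (k:Int))) + 2 := by ring
          rw [this, mod_shift2]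
        · have hk' : (k : Int) < (t.length : Int) := by
            simp at hk; exact_mod_cast hk
          constructor <;> intro <;> omega
      rw [hleft]
      -- assemble the join/reverse side
      by_cases ht : t = []
      · subst ht
        rw [pvChunks_nil, PySem.Chars.join_singleton]
        simp [PySem.List.enumerate_nil]
      · obtain ⟨q, rest, hq⟩ : ∃ q rest, pvChunks t = q :: rest := by
          cases hpc : pvChunks t with
          | nil => exact absurd hpc (pvChunks_ne_nil t ht)
          | cons q rest => exact ⟨q, rest, rfl⟩
        rw [hq, PySem.Chars.join_cons_cons, ← hq, if_neg ht]
        simp only [List.reverse_append]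
        rw [ih]
        simp


lemma pvFoldB (n : Int) (l : List (Int × Char)) (acc : List Char) :
    l.foldl (fun acc p =>
        (if p.1 > 0 ∧ PySem.Int.mod (n - p.1) 2 = 1 ∧ n - p.1 ≥ 3 then acc ++ [','] else acc)
          ++ [p.2]) acc = acc ++ l.flatMap (pvG n) := by
  have hbody : (fun (acc : List Char) (p : Int × Char) =>
      (if p.1 > 0 ∧ PySem.Int.mod (n - p.1) 2 = 1 ∧ n - p.1 ≥ 3 then acc ++ [','] else acc)
        ++ [p.2]) = fun acc p => acc ++ pvG n p := by
    funext acc p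
    unfold pvG
    split <;> simp
  rw [hbody, PySem.List.foldl_append_eq_flatMap]


lemma pvFinal : ∀ number : String, format_number_indian number = format_number_indian_alt number := by
  intro number
  unfold format_number_indian format_number_indian_alt
  by_cases h3 : PySem.Chars.len number.toList ≤ 3
  · rw [if_pos h3, if_pos h3]
  · rw [if_neg h3, if_neg h3]
    apply congrArg String.ofList
    set cs := number.toList with hcs
    have hm : 4 ≤ cs.length := by
      simp [PySem.Chars.len] at h3; omega
    have hrest : PySem.Chars.slice cs none (some (-3)) = cs.take (cs.length - 3) := by
      simpa using PySem.List.slice_to_neg_ofNat cs 3 (by omega)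
    have hlast : PySem.Chars.slice cs (some (-3)) none = cs.drop (cs.length - 3) := by
      simpa using PySem.List.slice_from_neg_ofNat cs 3 (by omega)
    rw [hrest, hlast]
    set r := cs.take (cs.length - 3) with hr
    set l3 := cs.drop (cs.length - 3) with hl3
    have hrl : r.length = cs.length - 3 := by simp [hr]
    have hl3len : l3.length = 3 := by simp [hl3]; omega
    obtain ⟨x, y, z, hxyz⟩ := List.length_eq_three.1 hl3len
    have hsplit : cs = r ++ l3 := (List.take_append_drop _ _).symm
    -- A side: rewrite the grouping to pvChunks and apply pvMain
    have hA := pvMain r.reverse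
    rw [List.reverse_reverse] at hA
    simp only [List.length_reverse] at hA
    simp only [pvChunks] at hA
    rw [hA]
    -- B side
    rw [pvFoldB]
    have hn : PySem.Chars.len cs = (r.length : Int) + 3 := by
      simp [PySem.Chars.len, hrl]; omega
    rw [hn, List.nil_append]
    conv_rhs => rw [hsplit]
    rw [PySem.List.enumerate_append, List.flatMap_append, hxyz]
    have htail : (PySem.List.enumerate [x, y, z] (0 + (r.length : Int))).flatMap (pvG ((r.length : Int) + 3))
        = [',', x, y, z] := by
      simp only [PySem.List.enumerate_cons, PySem.List.enumerate_nil, List.flatMap_cons,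
        List.flatMap_nil, pvG]
      rw [if_pos, if_neg, if_neg]
      · simp
      · intro ⟨_, _, hge⟩
        omega
      · intro ⟨_, hmod, _⟩
        have h4 : (r.length : Int) + 3 - (0 + (r.length : Int) + 1) = 2 := by ring
        rw [h4] at hmod
        simp [PySem.Int.mod] at hmod
      · refine ⟨by omega, ?_, by omega⟩
        have h5 : (r.length : Int) + 3 - (0 + (r.length : Int)) = 3 := by ring
        rw [h5]
        simp [PySem.Int.mod]
    rw [htail]
    simp

-- ===== VERDICT (by name: the statement is the Claim_ definition above) =====
theorem format_number_indian_spec : Claim_equal_format_number_indian := by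
  intro number _
  unfold Spec_format_number_indian
  exact pvFinal number
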